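-- pv_equiv track=rewrite | github.com/cam4ani/PhD-AnimalWelfare | old/UTILS_old.py | dico_zone_duration
-- ===== SOURCE A (Python) =====
-- import itertools
--
-- def dico_zone_duration(li, nbr_sec):
--     '''function to find a list of duration per zone'''
--     v = [(x[0], len(list(x[1]))) for x in itertools.groupby(li)]
--     v = sorted(v, key = lambda i: i[1])
--     d = {}
--     for i,j in v:
--         if i not in d:
--             d[i] = []
--         d[i].append(j*nbr_sec)
--     return d
-- ===== SOURCE B (Python) =====
-- import itertools
--
-- def dico_zone_duration(li, nbr_sec):
--     '''durations per zone: bucket the runs by their length, then walk the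
--     distinct lengths in increasing order, appending length*nbr_sec to each
--     zone that has a run of that length'''
--     by_len = {}
--     for zone, grp in itertools.groupby(li):
--         by_len.setdefault(sum(1 for _ in grp), []).append(zone)
--     d = {}
--     for c in sorted(by_len):
--         for zone in by_len[c]:
--             d.setdefault(zone, []).append(c * nbr_sec)
--     return d
-- ===== Notes on version B (the rewrite author's own statement) =====
-- stated objective: alternative
-- what changed: Instead of comparison-sorting the whole run list by length and distributing it into the dict, B buckets the runs by their length in one groupby pass and then walks the distinct lengths in increasing order (a bucket-sort decomposition), appending length*nbr_sec per zone.
import Mathlib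
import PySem

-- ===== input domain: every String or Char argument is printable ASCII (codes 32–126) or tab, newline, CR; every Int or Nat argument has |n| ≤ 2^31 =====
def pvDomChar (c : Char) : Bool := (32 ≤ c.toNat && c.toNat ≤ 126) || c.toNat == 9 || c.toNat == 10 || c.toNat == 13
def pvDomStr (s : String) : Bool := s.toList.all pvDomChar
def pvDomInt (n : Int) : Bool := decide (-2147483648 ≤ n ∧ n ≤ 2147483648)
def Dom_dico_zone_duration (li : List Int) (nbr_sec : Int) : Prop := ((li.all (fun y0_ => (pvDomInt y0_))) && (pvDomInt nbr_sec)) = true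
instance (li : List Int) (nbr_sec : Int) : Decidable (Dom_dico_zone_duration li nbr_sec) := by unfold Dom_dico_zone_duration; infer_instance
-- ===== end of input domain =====

-- B buckets the runs by their length in one groupby pass and then walks the distinct
-- lengths in increasing order (a bucket-sort decomposition), instead of A's
-- comparison sort of the whole run list followed by a distributing loop.
-- Objective: alternative; return values proven identical.

-- itertools.groupby(li) with run lengths: shared helper, the obvious structural
-- recursion (both Pythons enumerate the runs of li the same way)
def pyRLE : List Int → List (Int × Int)
  | [] => []
  | x :: xs =>
    match pyRLE xs with
    | [] => [(x, 1)]
    | (y, c) :: rest => if x == y then (y, c + 1) :: rest else (x, 1) :: (y, c) :: rest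

-- ===== PORT A =====
def dico_zone_duration (li : List Int) (nbr_sec : Int) : List (Int × List Int) :=
  let v := pyRLE li
  let vs := PySem.List.sorted v (fun i => i.2)
  let d := vs.foldl (fun (d : PySem.Dict Int (List Int)) ij =>
    let d' := if d.contains ij.1 then d else d.insert ij.1 []
    d'.modify ij.1 [] (fun l => l ++ [ij.2 * nbr_sec])) PySem.Dict.empty
  d.items

-- ===== PORT B =====
-- 'm.setdefault(k, []).append(x)' is ported as the insert-if-absent step followed
-- by an in-place modify (exact: same dict, same key order)
def dico_zone_duration_alt (li : List Int) (nbr_sec : Int) : List (Int × List Int) :=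
  let by_len := (pyRLE li).foldl (fun (m : PySem.Dict Int (List Int)) p =>
    let m' := if m.contains p.2 then m else m.insert p.2 []
    m'.modify p.2 [] (fun l => l ++ [p.1])) PySem.Dict.empty
  let d := (PySem.List.sorted by_len.keys (fun c => c)).foldl
    (fun (d : PySem.Dict Int (List Int)) c =>
      (by_len.getD c []).foldl (fun (d : PySem.Dict Int (List Int)) z =>
        let d' := if d.contains z then d else d.insert z []
        d'.modify z [] (fun l => l ++ [c * nbr_sec])) d) PySem.Dict.empty
  d.items

-- ===== PRECONDITION & SPEC =====
def Spec_dico_zone_duration (li : List Int) (nbr_sec : Int) (out : List (Int × List Int)) : Prop := out = dico_zone_duration_alt li nbr_sec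
instance (li : List Int) (nbr_sec : Int) (out : List (Int × List Int)) : Decidable (Spec_dico_zone_duration li nbr_sec out) := by unfold Spec_dico_zone_duration; infer_instance

-- ===== CLAIM (what is proved, stated in full; the proofs are below) =====
def Claim_equal_dico_zone_duration : Prop := ∀ (li : List Int) (nbr_sec : Int), Dom_dico_zone_duration li nbr_sec → Spec_dico_zone_duration li nbr_sec (dico_zone_duration li nbr_sec)

-- ===== LEMMAS AND PROOFS =====

-- lexicographic key of an enumerated run (index, (zone, length)): (length, index)
def lkey (p : Int × Int × Int) : Lex (Int × Int) := toLex (p.2.2, p.1)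

-- ---- dict plumbing (shared by both ports' append-into-bucket steps) ----

theorem contains_keys (d : PySem.Dict Int (List Int)) (k : Int) : PySem.Set.contains d.keys k = d.contains k := by
  unfold PySem.Set.contains PySem.Dict.contains PySem.Dict.keys
  rw [List.contains_eq_any_beq, List.any_map]
  simp only [Function.comp_def, Bool.beq_comm]

theorem keys_insert (d : PySem.Dict Int (List Int)) (k : Int) (v : List Int) :
    (d.insert k v).keys = PySem.Set.add d.keys k := by
  unfold PySem.Dict.insert PySem.Set.add
  rw [contains_keys]
  split
  · unfold PySem.Dict.keys
    simp only [List.map_map]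
    apply List.map_congr_left
    intro p hp
    by_cases h : p.1 = k <;> simp [h]
  · unfold PySem.Dict.keys
    simp

theorem getD_eq_nil_of_not_contains (d : PySem.Dict Int (List Int)) (z : Int) (h : d.contains z = false) :
    d.getD z [] = [] := by
  unfold PySem.Dict.getD PySem.Dict.get? PySem.Dict.contains at *
  rw [List.find?_eq_none.2]
  · rfl
  · intro p hp hpz
    simp only [List.any_eq_false] at h
    exact h p hp hpz

theorem step_modify (d : PySem.Dict Int (List Int)) (z : Int) (x : List Int) :
    (if d.contains z then d else d.insert z []).modify z [] (fun l => l ++ x)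
      = d.modify z [] (fun l => l ++ x) := by
  by_cases h : d.contains z = true
  · simp [h]
  · rw [Bool.not_eq_true] at h
    rw [if_neg (by simp [h])]
    unfold PySem.Dict.modify
    rw [PySem.Dict.getD_insert_self, PySem.Dict.insert_insert_self, getD_eq_nil_of_not_contains d z h]

theorem keys_modFold (l : List (Int × Int)) (d : PySem.Dict Int (List Int)) :
    (l.foldl (fun d p => d.modify p.1 [] (fun xs => xs ++ [p.2])) d).keys
      = PySem.Set.update d.keys (l.map (fun p => p.1)) := by
  induction l generalizing d with
  | nil => rfl
  | cons p t ih =>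
    simp only [List.foldl_cons, List.map_cons]
    rw [ih]
    unfold PySem.Set.update
    simp only [List.foldl_cons]
    congr 1
    unfold PySem.Dict.modify
    exact keys_insert _ _ _

-- ---- the stable sort by run length, characterised through the lex key ----

theorem insertBy_congr {α : Type} (bf bf' : α → α → Bool) (x : α) (acc : List α)
    (h : ∀ y ∈ acc, bf x y = bf' x y) :
    PySem.List.insertBy bf x acc = PySem.List.insertBy bf' x acc := by
  induction acc with
  | nil => rfl
  | cons y ys ih =>
    show (if bf x y then x :: y :: ys else y :: PySem.List.insertBy bf x ys)
        = (if bf' x y then x :: y :: ys else y :: PySem.List.insertBy bf' x ys)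
    rw [h y (List.mem_cons_self), ih (fun z hz => h z (List.mem_cons_of_mem _ hz))]

theorem map_insertBy {α β : Type} (f : α → β) (bf : α → α → Bool) (bf' : β → β → Bool) (x : α) (acc : List α)
    (h : ∀ a b, bf a b = bf' (f a) (f b)) :
    (PySem.List.insertBy bf x acc).map f = PySem.List.insertBy bf' (f x) (acc.map f) := by
  induction acc with
  | nil => rfl
  | cons y ys ih =>
    show ((if bf x y then x :: y :: ys else y :: PySem.List.insertBy bf x ys)).map f
        = (if bf' (f x) (f y) then f x :: f y :: ys.map f else f y :: PySem.List.insertBy bf' (f x) (ys.map f))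
    rw [← h]
    by_cases hb : bf x y <;> simp [hb, ih]

theorem sorted_map {α β κ : Type} [LT κ] [DecidableLT κ] (f : α → β) (key : β → κ) (l : List α) :
    PySem.List.sorted (l.map f) key = (PySem.List.sorted l (fun a => key (f a))).map f := by
  unfold PySem.List.sorted
  simp only [if_neg (by simp : ¬(false = true)), List.foldl_map]
  have : ∀ (acc : List α),
      l.foldl (fun acc x => PySem.List.insertBy (fun a b => decide (key a < key b)) (f x) acc) (acc.map f)
        = (l.foldl (fun acc x => PySem.List.insertBy (fun a b => decide (key (f a) < key (f b))) x acc) acc).map f := by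
    induction l with
    | nil => intro acc; rfl
    | cons y ys ih =>
      intro acc
      simp only [List.foldl_cons]
      rw [← map_insertBy f _ _ y acc (fun a b => rfl), ih]
  exact this []

theorem sorted_stab (l : List (Int × Int × Int))
    (h : l.Pairwise (fun p q => p.1 < q.1)) :
    PySem.List.sorted l (fun p => p.2.2) = PySem.List.sorted l lkey := by
  unfold PySem.List.sorted
  simp only [if_neg (by simp : ¬(false = true))]
  have main : ∀ (l : List (Int × Int × Int)) (acc : List (Int × Int × Int)),
      l.Pairwise (fun p q => p.1 < q.1) →
      (∀ a ∈ acc, ∀ b ∈ l, a.1 < b.1) →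
      l.foldl (fun acc x => PySem.List.insertBy (fun a b => decide (a.2.2 < b.2.2)) x acc) acc
        = l.foldl (fun acc x => PySem.List.insertBy (fun a b => decide (lkey a < lkey b)) x acc) acc := by
    intro l
    induction l with
    | nil => intro acc _ _; rfl
    | cons x xs ih =>
      intro acc hp hacc
      simp only [List.foldl_cons]
      have hxy : ∀ y ∈ acc, (decide (x.2.2 < y.2.2)) = (decide (lkey x < lkey y)) := by
        intro y hy
        have hyx : y.1 < x.1 := hacc y hy x List.mem_cons_self
        have : (x.2.2 < y.2.2) ↔ (lkey x < lkey y) := by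
          unfold lkey
          rw [Prod.Lex.lt_iff]
          constructor
          · exact fun h' => Or.inl h'
          · rintro (h' | ⟨h1, h2⟩)
            · exact h'
            · exfalso; simp at h2; omega
        rw [decide_eq_decide.2 this]
      rw [insertBy_congr (fun a b => decide (a.2.2 < b.2.2)) (fun a b => decide (lkey a < lkey b)) x acc hxy]
      apply ih _ (List.Pairwise.of_cons hp)
      intro a ha b hb
      rcases (PySem.List.mem_insertBy _ x a acc).1 ha with rfl | ha'
      · exact (List.pairwise_cons.1 hp).1 b hb
      · exact hacc a ha' b (List.mem_cons_of_mem _ hb)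
  exact main l [] h (by intro a ha; cases ha)

theorem W_pairwise (v : List (Int × Int)) :
    (PySem.List.sorted (PySem.List.enumerate v) lkey).Pairwise (fun a b => lkey a < lkey b) := by
  have hle := PySem.List.sorted_pairwise (PySem.List.enumerate v) lkey
  have hperm := PySem.List.sorted_perm (PySem.List.enumerate v) lkey false
  have hne : (PySem.List.sorted (PySem.List.enumerate v) lkey).Pairwise (fun a b => a.1 ≠ b.1) := by
    have hnd : ((PySem.List.enumerate v).map (fun p => p.1)).Nodup :=
      (List.pairwise_map.2 ((PySem.List.pairwise_lt_enumerate v 0).imp (fun h => ne_of_lt h)))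
    have : ((PySem.List.sorted (PySem.List.enumerate v) lkey).map (fun p => p.1)).Nodup :=
      ((hperm.map (fun p => p.1)).nodup_iff).2 hnd
    exact List.pairwise_map.1 this
  refine (hle.and hne).imp ?_
  rintro a b ⟨h1, h2⟩
  rcases lt_or_eq_of_le h1 with h | h
  · exact h
  · exfalso
    apply h2
    have := congrArg (fun x => (ofLex x).2) h
    unfold lkey at this
    simpa using this

theorem vs_eq_W (v : List (Int × Int)) :
    PySem.List.sorted v (fun i => i.2) = (PySem.List.sorted (PySem.List.enumerate v) lkey).map (fun p => p.2) := by
  conv_lhs => rw [← PySem.List.map_snd_enumerate v 0]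
  rw [sorted_map (fun p => p.2) (fun i => i.2) (PySem.List.enumerate v 0)]
  rw [show (fun (a : Int × Int × Int) => a.2.2) = (fun (a : Int × Int × Int) => (fun (i : Int × Int) => i.2) a.2) from rfl] at *
  rw [← sorted_stab _ (PySem.List.pairwise_lt_enumerate v 0)]

theorem filter_sorted (v : List (Int × Int)) (q : Int × Int × Int → Bool)
    (hq : ((PySem.List.enumerate v).filter q).Pairwise (fun a b => lkey a < lkey b)) :
    (PySem.List.sorted (PySem.List.enumerate v) lkey).filter q
      = (PySem.List.enumerate v).filter q := by
  have h1 : (PySem.List.sorted (PySem.List.enumerate v) lkey).filter q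
      = PySem.List.sorted ((PySem.List.enumerate v).filter q) lkey := by
    apply (PySem.List.sorted_eq_of_perm_of_pairwise_lt _ _ lkey ?_ ?_).symm
    · exact (PySem.List.sorted_perm (PySem.List.enumerate v) lkey false).filter _
    · exact List.Pairwise.sublist List.filter_sublist (W_pairwise v)
  rw [h1]
  exact PySem.List.sorted_eq_of_perm_of_pairwise_lt _ _ lkey (List.Perm.refl _) hq

-- ---- a strictly lex-sorted list is the concatenation of its length classes ----

theorem lex_fst_le (a b : Int × Int × Int) (h : lkey a < lkey b) : a.2.2 ≤ b.2.2 := by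
  unfold lkey at h
  rw [Prod.Lex.lt_iff] at h
  rcases h with h | ⟨h, _⟩
  · exact le_of_lt h
  · exact le_of_eq h

theorem bucket_split (c : Int) (L : List (Int × Int × Int))
    (hpw : L.Pairwise (fun a b => lkey a < lkey b)) (hmin : ∀ p ∈ L, c ≤ p.2.2) :
    L = L.filter (fun p => p.2.2 == c) ++ L.filter (fun p => !(p.2.2 == c)) := by
  induction L with
  | nil => rfl
  | cons h T ih =>
    by_cases hc : h.2.2 = c
    · simp only [List.filter_cons, hc, BEq.refl, Bool.not_true, if_pos, Bool.false_eq_true, if_false,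
        List.cons_append]
      congr 1
      exact ih (List.Pairwise.of_cons hpw) (fun p hp => hmin p (List.mem_cons_of_mem _ hp))
    · have hgt : ∀ p ∈ h :: T, c < p.2.2 := by
        intro p hp
        rcases List.mem_cons.1 hp with rfl | hp'
        · exact lt_of_le_of_ne (hmin p List.mem_cons_self) (fun e => hc e.symm)
        · have := lex_fst_le h p ((List.pairwise_cons.1 hpw).1 p hp')
          have := lt_of_le_of_ne (hmin h List.mem_cons_self) (fun e => hc e.symm)
          omega
      have h1 : (h :: T).filter (fun p => p.2.2 == c) = [] := by
        rw [List.filter_eq_nil_iff]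
        intro p hp
        simpa using ne_of_gt (hgt p hp)
      have h2 : (h :: T).filter (fun p => !(p.2.2 == c)) = h :: T := by
        rw [List.filter_eq_self]
        intro p hp
        simpa using ne_of_gt (hgt p hp)
      rw [h1, h2, List.nil_append]

theorem bucket_flatMap (K : List Int) (L : List (Int × Int × Int))
    (hK : K.Pairwise (fun a b => a < b))
    (hpw : L.Pairwise (fun a b => lkey a < lkey b))
    (hmem : ∀ p ∈ L, p.2.2 ∈ K) :
    L = K.flatMap (fun c => L.filter (fun p => p.2.2 == c)) := by
  induction K generalizing L with
  | nil =>
    rcases L with _ | ⟨p, T⟩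
    · rfl
    · exact absurd (hmem p List.mem_cons_self) (by simp)
  | cons c K' ih =>
    have hmin : ∀ p ∈ L, c ≤ p.2.2 := by
      intro p hp
      rcases List.mem_cons.1 (hmem p hp) with h | h
      · exact le_of_eq h.symm
      · exact le_of_lt ((List.pairwise_cons.1 hK).1 _ h)
    have hsplit := bucket_split c L hpw hmin
    have hL' : L.filter (fun p => !(p.2.2 == c))
        = K'.flatMap (fun c' => (L.filter (fun p => !(p.2.2 == c))).filter (fun p => p.2.2 == c')) := by
      apply ih _ (List.pairwise_cons.1 hK).2 (List.Pairwise.sublist List.filter_sublist hpw)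
      intro p hp
      have hpc : p.2.2 ≠ c := by simpa using (List.mem_filter.1 hp).2
      rcases List.mem_cons.1 (hmem p (List.filter_sublist.subset hp)) with h | h
      · exact absurd h hpc
      · exact h
    have hff : ∀ c' ∈ K', (L.filter (fun p => !(p.2.2 == c))).filter (fun p => p.2.2 == c')
        = L.filter (fun p => p.2.2 == c') := by
      intro c' hc'
      have hne : c ≠ c' := ne_of_lt ((List.pairwise_cons.1 hK).1 c' hc')
      rw [List.filter_filter]
      apply List.filter_congr
      intro p _
      by_cases h : p.2.2 = c'
      · simp [h, hne.symm]
      · simp [h]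
    rw [List.flatMap_cons, ← List.flatMap_congr hff, ← hL']
    exact hsplit

theorem foldl_flatMap_nested {α β γ : Type} (K : List β) (f : β → List α) (g : γ → α → γ) (init : γ) :
    (K.flatMap f).foldl g init = K.foldl (fun acc c => (f c).foldl g acc) init := by
  induction K generalizing init with
  | nil => rfl
  | cons c K' ih => rw [List.flatMap_cons, List.foldl_append, List.foldl_cons, ih]

-- the central fact: A's stable sort of the runs by length is exactly B's walk over
-- the ascending distinct lengths, each length contributing its runs in input order
theorem stable_bucket (v : List (Int × Int)) :
    (PySem.List.sorted (PySem.List.dedup (v.map (fun p => p.2))) (fun c => c)).flatMap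
        (fun c => v.filter (fun p => p.2 == c))
      = PySem.List.sorted v (fun i => i.2) := by
  have hKpw : (PySem.List.sorted (PySem.List.dedup (v.map (fun p => p.2))) (fun c => c)).Pairwise (fun a b => a < b) := by
    have hle := PySem.List.sorted_pairwise (PySem.List.dedup (v.map (fun p => p.2))) (fun c => c)
    have hnd : (PySem.List.sorted (PySem.List.dedup (v.map (fun p => p.2))) (fun c => c)).Nodup :=
      ((PySem.List.sorted_perm _ _ false).nodup_iff).2 (PySem.List.nodup_dedup _)
    refine (hle.and hnd).imp ?_
    rintro a b ⟨h1, h2⟩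
    exact lt_of_le_of_ne h1 h2
  have hWpw := W_pairwise v
  have hmem : ∀ p ∈ PySem.List.sorted (PySem.List.enumerate v) lkey,
      p.2.2 ∈ PySem.List.sorted (PySem.List.dedup (v.map (fun p => p.2))) (fun c => c) := by
    intro p hp
    rw [PySem.List.mem_sorted, PySem.List.mem_dedup]
    have hpv : p.2 ∈ v := by
      have : p.2 ∈ (PySem.List.enumerate v).map (fun q => q.2) :=
        List.mem_map.2 ⟨p, (PySem.List.sorted_perm _ lkey false).subset hp, rfl⟩
      rwa [PySem.List.map_snd_enumerate] at this
    exact List.mem_map.2 ⟨p.2, hpv, rfl⟩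
  have hW := bucket_flatMap _ _ hKpw hWpw hmem
  have hfc : ∀ c : Int, v.filter (fun p => p.2 == c)
      = ((PySem.List.sorted (PySem.List.enumerate v) lkey).filter (fun p => p.2.2 == c)).map (fun p => p.2) := by
    intro c
    have hEpw : ((PySem.List.enumerate v).filter (fun p => p.2.2 == c)).Pairwise (fun a b => lkey a < lkey b) := by
      have hidx : ((PySem.List.enumerate v).filter (fun p => p.2.2 == c)).Pairwise (fun a b => a.1 < b.1) :=
        List.Pairwise.sublist List.filter_sublist (PySem.List.pairwise_lt_enumerate v 0)
      refine List.Pairwise.imp_of_mem ?_ hidx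
      intro a b ha hb hab
      have hac : a.2.2 = c := by simpa using (List.mem_filter.1 ha).2
      have hbc : b.2.2 = c := by simpa using (List.mem_filter.1 hb).2
      unfold lkey
      rw [Prod.Lex.lt_iff]
      exact Or.inr ⟨by simp [hac, hbc], hab⟩
    rw [filter_sorted v _ hEpw]
    conv_lhs => rw [← PySem.List.map_snd_enumerate v 0]
    rw [List.filter_map]
    rfl
  calc (PySem.List.sorted (PySem.List.dedup (v.map (fun p => p.2))) (fun c => c)).flatMap
        (fun c => v.filter (fun p => p.2 == c))
      = (PySem.List.sorted (PySem.List.dedup (v.map (fun p => p.2))) (fun c => c)).flatMap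
        (fun c => ((PySem.List.sorted (PySem.List.enumerate v) lkey).filter (fun p => p.2.2 == c)).map (fun p => p.2)) := by
        exact List.flatMap_congr (fun c _ => hfc c)
    _ = ((PySem.List.sorted (PySem.List.dedup (v.map (fun p => p.2))) (fun c => c)).flatMap
        (fun c => (PySem.List.sorted (PySem.List.enumerate v) lkey).filter (fun p => p.2.2 == c))).map (fun p => p.2) := by
        rw [List.map_flatMap]
    _ = (PySem.List.sorted (PySem.List.enumerate v) lkey).map (fun p => p.2) := by rw [← hW]
    _ = PySem.List.sorted v (fun i => i.2) := (vs_eq_W v).symm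

-- ---- glue: the two ports build the same dict ----

theorem ab_eq (li : List Int) (nbr_sec : Int) :
    dico_zone_duration li nbr_sec = dico_zone_duration_alt li nbr_sec := by
  unfold dico_zone_duration dico_zone_duration_alt
  simp only [step_modify]
  -- B's bucket dict, as a fold over the (length, zone) swaps
  have hswap : (pyRLE li).foldl (fun (m : PySem.Dict Int (List Int)) p => m.modify p.2 [] (fun l => l ++ [p.1])) PySem.Dict.empty
      = ((pyRLE li).map (fun p => (p.2, p.1))).foldl (fun (m : PySem.Dict Int (List Int)) q => m.modify q.1 [] (fun l => l ++ [q.2])) PySem.Dict.empty := by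
    rw [List.foldl_map]
  rw [hswap]
  have hkeys : (((pyRLE li).map (fun p => (p.2, p.1))).foldl (fun (m : PySem.Dict Int (List Int)) q => m.modify q.1 [] (fun l => l ++ [q.2])) PySem.Dict.empty).keys
      = PySem.List.dedup ((pyRLE li).map (fun p => p.2)) := by
    rw [keys_modFold, List.map_map, PySem.List.dedup_eq_ofList]
    rfl
  rw [hkeys]
  have hinner : ∀ (d : PySem.Dict Int (List Int)) (c : Int),
      ((((pyRLE li).map (fun p => (p.2, p.1))).foldl (fun (m : PySem.Dict Int (List Int)) q => m.modify q.1 [] (fun l => l ++ [q.2])) PySem.Dict.empty).getD c []).foldl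
        (fun d z => d.modify z [] (fun l => l ++ [c * nbr_sec])) d
      = ((pyRLE li).filter (fun p => p.2 == c)).foldl
        (fun d p => d.modify p.1 [] (fun l => l ++ [p.2 * nbr_sec])) d := by
    intro d c
    rw [PySem.Dict.getD_foldl_modify_append]
    have hfm : ((pyRLE li).map (fun p => (p.2, p.1))).filter (fun q => q.1 == c)
        = ((pyRLE li).filter (fun p => p.2 == c)).map (fun p => (p.2, p.1)) := by
      rw [List.filter_map]; rfl
    have hempty : (PySem.Dict.empty : PySem.Dict Int (List Int)).getD c [] = [] := rfl
    rw [hfm, hempty, List.nil_append, List.map_map, List.foldl_map]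
    apply PySem.List.foldl_congr_mem
    intro acc p hp
    have : p.2 = c := by simpa using (List.mem_filter.1 hp).2
    rw [this]
    rfl
  congr 1
  rw [← stable_bucket (pyRLE li), foldl_flatMap_nested]
  exact PySem.List.foldl_congr_mem _ _ _ _ (fun acc c hc => (hinner acc c).symm)

-- ===== VERDICT (by name: the statement is the Claim_ definition above) =====
theorem dico_zone_duration_spec : Claim_equal_dico_zone_duration := by
  intro li nbr_sec _
  unfold Spec_dico_zone_duration
  exact ab_eq li nbr_sec
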